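-- pv_equiv track=rewrite | github.com/houdinipapi/Scientific-Computing | Arithmetic Formatter/arithmetic_arranger.py | arithmetic_arranger
-- ===== SOURCE A (Python) =====
-- def arithmetic_arranger(problems, show_answers=False):
--     # Check if the number of problems exceeds the limit of five.
--     if len(problems) > 5:
--         return "Error: Too many problems."
--
--     # Initialize four empty lists: --> Will store the formatted components of each problem.
--     top_nums = list()
--     bottom_nums = list()
--     lines = list()
--     results = list()
--
--     # Iterate over each problem in the 'problems' list.
--     for problem in problems:
--         # split each problem into its components --> first operand, operator, and second operand.
--         first_operand, operator, second_operand = problem.split()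
--
--         # Check if the operator is valid.
--         if operator not in ['+', '-']:
--             return "Error: Operator must be '+' or '-'."
--
--         # Check if both operands consist of digits only.
--         if not first_operand.isdigit() or not second_operand.isdigit():
--             return "Error: Numbers must only contain digits."
--
--         # Check if the length of any operand exceeds four digits.
--         if len(first_operand) > 4 or len(second_operand) > 4:
--             return "Error: Numbers cannot be more than four digits."
--
--         # Determine the maximum length among the two operands and add two spaces to it --> width.
--         width = max(len(first_operand), len(second_operand)) + 2
--
--         # Add the formatted components of the problem to the respective lists.
--         top_nums.append(first_operand.rjust(width))
--         bottom_nums.append(operator + second_operand.rjust(width - 1))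
--         lines.append('-' * width)
--
--         # If True --> calculate the answer based on the operator and the operands & Append it to 'results'.
--         if show_answers:
--             if operator == '+':
--                 result = str(int(first_operand) + int(second_operand))
--
--             else:
--                 result = str(int(first_operand) - int(second_operand))
--
--             results.append(result.rjust(width))
--
--     # Final arranged string --> Joining the formatted components from the lists.
--     arranged_problems = '    '.join(top_nums) + '\n' + '    '.join(bottom_nums) + '\n' + '    '.join(lines)
--
--     # If True --> add a line containing the results.
--     if show_answers:
--         arranged_problems += '\n' + '    '.join(results)
--
--     # Return the final arranged string.
--     return arranged_problems
-- ===== SOURCE B (Python) =====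
-- def _first_error(problems):
--     for problem in problems:
--         first, op, second = problem.split()
--         if op not in ('+', '-'):
--             return "Error: Operator must be '+' or '-'."
--         if not first.isdigit() or not second.isdigit():
--             return "Error: Numbers must only contain digits."
--         if len(first) > 4 or len(second) > 4:
--             return "Error: Numbers cannot be more than four digits."
--     return None
--
--
-- def _piece(problem, i):
--     first, op, second = problem.split()
--     width = max(len(first), len(second)) + 2
--     if i == 0:
--         return first.rjust(width)
--     if i == 1:
--         return op + second.rjust(width - 1)
--     if i == 2:
--         return '-' * width
--     value = int(first) - int(second) if op == '-' else int(first) + int(second)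
--     return str(value).rjust(width)
--
--
-- def arithmetic_arranger(problems, show_answers=False):
--     if len(problems) > 5:
--         return "Error: Too many problems."
--     err = _first_error(problems)
--     if err is not None:
--         return err
--     nrows = 4 if show_answers else 3
--     return '\n'.join('    '.join(_piece(p, i) for p in problems) for i in range(nrows))
-- ===== Notes on version B (the rewrite author's own statement) =====
-- stated objective: alternative
-- what changed: B is staged: a pure validation pass first returns the first error (same check order as A), then a stateless render phase re-parses each problem per output row and joins rows directly, keeping no accumulator lists at all; A interleaves validation and formatting in one pass over four parallel lists. Pre_ only excludes inputs where A raises ValueError (a reached problem whose split() does not give exactly 3 tokens).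
import Mathlib
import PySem

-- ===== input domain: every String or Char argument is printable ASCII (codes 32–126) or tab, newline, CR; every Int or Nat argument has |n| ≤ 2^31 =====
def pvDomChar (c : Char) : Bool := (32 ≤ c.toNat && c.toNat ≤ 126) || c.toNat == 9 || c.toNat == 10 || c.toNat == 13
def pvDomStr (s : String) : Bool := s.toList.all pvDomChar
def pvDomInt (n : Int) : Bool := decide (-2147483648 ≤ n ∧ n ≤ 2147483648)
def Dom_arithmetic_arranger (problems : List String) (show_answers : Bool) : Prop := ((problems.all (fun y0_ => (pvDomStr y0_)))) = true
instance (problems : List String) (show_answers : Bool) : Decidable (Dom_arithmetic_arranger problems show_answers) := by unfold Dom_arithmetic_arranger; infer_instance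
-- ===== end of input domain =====

-- B stages the work: a pure validation pass returns the first error (same check order as A),
-- then a stateless render re-parses each problem per output row — no accumulator lists
-- (objective: alternative decomposition, same cost).


-- ===== PORT A =====
-- shared Python primitives missing from PySem (exact on this file's inputs):
-- s.rjust(w) (space fill), '+' concatenation of strings, '-'*w, int(s) on a digit string (ofStr? is `some` there)
def pvRjust (s : String) (w : Int) : String := String.ofList (List.replicate (w.toNat - s.toList.length) ' ' ++ s.toList)
def pvCat (a b : String) : String := String.ofList (a.toList ++ b.toList)
def pvDashes (w : Int) : String := String.ofList (List.replicate w.toNat '-')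
def pvInt (s : String) : Int := (PySem.Int.ofStr? s).getD 0

-- A's loop over `problems`, carrying the four parallel lists; the `[]` case is A's final assembly.
-- The `_` split branch is where Python raises ValueError (unpacking); excluded by Pre_.
def pvALoop (show_answers : Bool) (ps : List String) (tops bots lns res : List String) : String :=
  match ps with
  | [] =>
    let arranged := pvCat (PySem.Str.join "    " tops) (pvCat "\n"
      (pvCat (PySem.Str.join "    " bots) (pvCat "\n" (PySem.Str.join "    " lns))))
    if show_answers then pvCat arranged (pvCat "\n" (PySem.Str.join "    " res)) else arranged
  | p :: rest =>
    match PySem.Str.split₀ p with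
    | [f, op, s] =>
      if !(op == "+" || op == "-") then "Error: Operator must be '+' or '-'."
      else if !(PySem.Str.strIsdigit f) || !(PySem.Str.strIsdigit s) then "Error: Numbers must only contain digits."
      else if PySem.Str.len f > 4 || PySem.Str.len s > 4 then "Error: Numbers cannot be more than four digits."
      else
        let w := max (PySem.Str.len f) (PySem.Str.len s) + 2
        let res' := if show_answers then
            res ++ [pvRjust (PySem.Int.toStr (if op == "+" then pvInt f + pvInt s else pvInt f - pvInt s)) w]
          else res
        pvALoop show_answers rest (tops ++ [pvRjust f w]) (bots ++ [pvCat op (pvRjust s (w - 1))])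
          (lns ++ [pvDashes w]) res'
    | _ => ""

def arithmetic_arranger (problems : List String) (show_answers : Bool) : String :=
  if problems.length > 5 then "Error: Too many problems."
  else pvALoop show_answers problems [] [] [] []

-- ===== PORT B =====
-- B's validation pass (_first_error): first failing check wins, same check order as A;
-- the `_` split branch is again the excluded ValueError.
def pvFirstError (ps : List String) : Option String :=
  match ps with
  | [] => none
  | p :: rest =>
    match PySem.Str.split₀ p with
    | [f, op, s] =>
      if !(op == "+" || op == "-") then some "Error: Operator must be '+' or '-'."
      else if !(PySem.Str.strIsdigit f) || !(PySem.Str.strIsdigit s) then some "Error: Numbers must only contain digits."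
      else if PySem.Str.len f > 4 || PySem.Str.len s > 4 then some "Error: Numbers cannot be more than four digits."
      else pvFirstError rest
    | _ => some ""

-- B's _piece: re-parses the problem and returns the row-i fragment for it, statelessly.
def pvPiece (i : Nat) (p : String) : String :=
  match PySem.Str.split₀ p with
  | [f, op, s] =>
    let w := max (PySem.Str.len f) (PySem.Str.len s) + 2
    if i == 0 then pvRjust f w
    else if i == 1 then pvCat op (pvRjust s (w - 1))
    else if i == 2 then pvDashes w
    else pvRjust (PySem.Int.toStr (if op == "-" then pvInt f - pvInt s else pvInt f + pvInt s)) w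
  | _ => ""

def arithmetic_arranger_alt (problems : List String) (show_answers : Bool) : String :=
  if problems.length > 5 then "Error: Too many problems."
  else
    match pvFirstError problems with
    | some e => e
    | none =>
      let nrows := if show_answers then 4 else 3
      PySem.Str.join "\n" ((List.range nrows).map (fun i =>
        PySem.Str.join "    " (problems.map (pvPiece i))))

-- ===== PRECONDITION & SPEC =====
-- whether one problem string passes all of the (shared) validation checks
def pvValid (p : String) : Bool :=
  match PySem.Str.split₀ p with
  | [f, op, s] =>
    (op == "+" || op == "-") && PySem.Str.strIsdigit f && PySem.Str.strIsdigit s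
      && PySem.Str.len f ≤ 4 && PySem.Str.len s ≤ 4
  | _ => false

-- Pre_ excludes exactly the inputs where Python A raises ValueError: a problem whose split()
-- has ≠ 3 tokens that the loop actually reaches (≤ 5 problems, all earlier problems valid).
def Pre_arithmetic_arranger (problems : List String) (show_answers : Bool) : Prop :=
  problems.length > 5 ∨
    ∀ i < problems.length, (∀ j < i, pvValid (problems.getD j "") = true) →
      (PySem.Str.split₀ (problems.getD i "")).length = 3
instance (problems : List String) (show_answers : Bool) : Decidable (Pre_arithmetic_arranger problems show_answers) := by unfold Pre_arithmetic_arranger; infer_instance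

def pvWitness_arithmetic_arranger : List String × Bool := (["98 + 3", "1000 - 999"], true)

def Spec_arithmetic_arranger (problems : List String) (show_answers : Bool) (out : String) : Prop := out = arithmetic_arranger_alt problems show_answers
instance (problems : List String) (show_answers : Bool) (out : String) : Decidable (Spec_arithmetic_arranger problems show_answers out) := by unfold Spec_arithmetic_arranger; infer_instance

-- ===== CLAIM (what is proved, stated in full; the proofs are below) =====
def Claim_equal_arithmetic_arranger : Prop := ∀ (problems : List String) (show_answers : Bool), Dom_arithmetic_arranger problems show_answers → Pre_arithmetic_arranger problems show_answers → Spec_arithmetic_arranger problems show_answers (arithmetic_arranger problems show_answers)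

-- ===== LEMMAS AND PROOFS =====
-- A's final assembly, expressed over B's per-row pieces of a single problem list
def pvRenderA (show_answers : Bool) (L : List String) : String :=
  let arranged := pvCat (PySem.Str.join "    " (L.map (pvPiece 0))) (pvCat "\n"
    (pvCat (PySem.Str.join "    " (L.map (pvPiece 1))) (pvCat "\n"
      (PySem.Str.join "    " (L.map (pvPiece 2))))))
  if show_answers then
    pvCat arranged (pvCat "\n" (PySem.Str.join "    " (L.map (pvPiece 3)))) else arranged

lemma pvLoop_eq (show_answers : Bool) (ps done : List String) :
    pvALoop show_answers ps (done.map (pvPiece 0)) (done.map (pvPiece 1)) (done.map (pvPiece 2))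
      (if show_answers then done.map (pvPiece 3) else []) =
    (match pvFirstError ps with
     | some e => e
     | none => pvRenderA show_answers (done ++ ps)) := by
  induction ps generalizing done with
  | nil => cases show_answers <;> simp [pvALoop, pvFirstError, pvRenderA]
  | cons p rest ih =>
    rw [pvALoop, pvFirstError]
    cases hsp : PySem.Str.split₀ p with
    | nil => rfl
    | cons f t1 =>
      cases t1 with
      | nil => rfl
      | cons op t2 =>
        cases t2 with
        | nil => rfl
        | cons s t3 =>
          cases t3 with
          | cons x t4 => rfl
          | nil =>
            by_cases h2 : (!(op == "+" || op == "-")) = true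
            · simp [h2]
            · by_cases h3 : (!PySem.Str.strIsdigit f || !PySem.Str.strIsdigit s) = true
              · simp only [h2]; simp at h3 ⊢ <;> simp [h3]
              · by_cases h4 : (decide (PySem.Str.len f > 4) || decide (PySem.Str.len s > 4)) = true
                · simp only [h2]; simp at h3 h4 ⊢ <;> simp [h3, h4]
                · have h2' := h2; simp at h2'
                  have h3' : ¬(PySem.Chars.strIsdigit f.toList = false ∨ PySem.Chars.strIsdigit s.toList = false) := by
                    simpa using h3
                  have h4' : ¬(4 < f.length ∨ 4 < s.length) := by simpa using h4
                  have harith : (if op = "+" then pvInt f + pvInt s else pvInt f - pvInt s)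
                      = (if op = "-" then pvInt f - pvInt s else pvInt f + pvInt s) := by
                    by_cases hp : op = "+"
                    · subst hp; simp
                    · simp [h2' hp]
                  have h2'' : ¬(¬op = "+" ∧ ¬op = "-") := fun h => h.2 (h2' h.1)
                  have hpc : ∀ i : Nat, pvPiece i p =
                      (let w := max (PySem.Str.len f) (PySem.Str.len s) + 2
                       if i == 0 then pvRjust f w
                       else if i == 1 then pvCat op (pvRjust s (w - 1))
                       else if i == 2 then pvDashes w
                       else pvRjust (PySem.Int.toStr (if op == "-" then pvInt f - pvInt s else pvInt f + pvInt s)) w) := by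
                    intro i; rw [pvPiece, hsp]
                  have := ih (done ++ [p])
                  simp only [List.map_append, List.map_cons, List.map_nil, hpc] at this
                  cases show_answers <;>
                    simpa [h2'', h3', h4', harith, List.cons_append] using this

lemma pvRender_eq (show_answers : Bool) (L : List String) :
    pvRenderA show_answers L =
      PySem.Str.join "\n" ((List.range (if show_answers then 4 else 3)).map (fun i =>
        PySem.Str.join "    " (L.map (pvPiece i)))) := by
  cases show_answers <;>
    · apply String.toList_inj.mp
      simp [pvRenderA, pvCat, List.range_succ, PySem.Str.join, PySem.Chars.join,
        List.intercalate, List.intersperse]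

-- ===== VERDICT (by name: the statement is the Claim_ definition above) =====
theorem arithmetic_arranger_spec : Claim_equal_arithmetic_arranger := by
  intro problems show_answers _ _
  unfold Spec_arithmetic_arranger arithmetic_arranger arithmetic_arranger_alt
  by_cases h5 : problems.length > 5
  · simp [h5]
  · simp only [h5, if_false]
    have := pvLoop_eq show_answers problems []
    simp only [List.map_nil, List.nil_append] at this
    rw [show (if show_answers then ([] : List String) else []) = [] from by cases show_answers <;> rfl] at this
    rw [this]
    cases hb : pvFirstError problems with
    | some e => rfl
    | none => simp [pvRender_eq]
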